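-- pv_equiv track=rewrite | github.com/Lenore8963/Vancouver_property_values | functions.py | clean_bc_property_value_dict
-- ===== SOURCE A (Python) =====
-- LAND_VALUE_INDEX = 0
--
-- def clean_bc_property_value_dict(property_dict):
--     '''
--     Function -- clean_bc_property_value_dict
--         purpose: delete bad data whose price columns are not numeric
--     Parameters:
--         property_dict -- a dictionary uncleaned
--     Return:
--         a cleaned dictionary with PIDs as keys and land_values and improvements_values as values
--     Error:
--         TypeError -- the parameter should be a dictionary
--     '''
--     if not isinstance(property_dict,dict):
--         raise TypeError("Function clean_bc_property_value_dict takes a dictionary")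
--     keys = property_dict.keys()
--     bad_data_keys = list()
--     for pid in keys:
--         if not property_dict[pid][LAND_VALUE_INDEX].isnumeric():
--             bad_data_keys += [pid]
--     for bad_key in bad_data_keys:
--         del property_dict[bad_key]
--     return property_dict
-- ===== SOURCE B (Python) =====
-- LAND_VALUE_INDEX = 0
--
-- def clean_bc_property_value_dict(property_dict):
--     # Alternative decomposition: instead of A's two staged forward loops over the
--     # dict (collect bad keys, then delete them in place), B consumes the items as
--     # an explicit stack (pop from the end), accumulating the kept entries in
--     # reverse, and then rebuilds the original dict in place (clear + update) from
--     # the reversed accumulator.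
--     if not isinstance(property_dict, dict):
--         raise TypeError("Function clean_bc_property_value_dict takes a dictionary")
--     stack = list(property_dict.items())
--     rev_good = []
--     while stack:
--         pid, v = stack.pop()
--         if v[LAND_VALUE_INDEX].isnumeric():
--             rev_good.append((pid, v))
--     property_dict.clear()
--     property_dict.update(reversed(rev_good))
--     return property_dict
-- ===== Notes on version B (the rewrite author's own statement) =====
-- stated objective: alternative
-- what changed: A does two staged forward loops over the dict (collect bad keys, then delete each in place); B instead consumes the item list as an explicit stack, popping from the end and accumulating the kept entries in reverse order, then rebuilds the dict in place with clear()+update(reversed(...)).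
import Mathlib
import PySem

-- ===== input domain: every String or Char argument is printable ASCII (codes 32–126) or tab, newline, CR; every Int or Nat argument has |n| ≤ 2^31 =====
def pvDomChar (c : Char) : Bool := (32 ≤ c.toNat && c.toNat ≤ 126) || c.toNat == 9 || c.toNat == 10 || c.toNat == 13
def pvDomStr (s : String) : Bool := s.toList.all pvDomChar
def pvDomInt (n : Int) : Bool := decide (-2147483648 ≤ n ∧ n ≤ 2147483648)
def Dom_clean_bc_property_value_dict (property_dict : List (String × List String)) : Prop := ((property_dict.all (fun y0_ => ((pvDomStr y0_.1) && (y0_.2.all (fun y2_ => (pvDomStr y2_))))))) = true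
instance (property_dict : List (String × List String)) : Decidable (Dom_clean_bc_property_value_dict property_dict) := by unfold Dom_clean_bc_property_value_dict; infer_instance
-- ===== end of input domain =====

-- B replaces A's two staged forward loops (collect bad keys, delete them in place) with an
-- explicit stack: it pops items from the end, accumulates the kept entries in reverse, and
-- rebuilds the dict in place with clear()+update(reversed(...)); the in-place mutation of the
-- argument is preserved and the equivalence proved here is about the returned dict.
-- Objective: alternative.


-- ===== PORT A =====
-- .isnumeric() is ported as PySem.Str.strIsdigit: on the printable-ASCII Dom the two Python
-- predicates coincide (the extra isnumeric characters are all non-ASCII).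
-- property_dict[pid][LAND_VALUE_INDEX] is ported with getD/pyGetD defaults; the inputs where the
-- real Python raises (an empty value list) are excluded by Pre_ below.
def clean_bc_property_value_dict (property_dict : List (String × List String)) : List (String × List String) :=
  let d := PySem.Dict.mk property_dict
  let keys := d.keys
  let bad_data_keys : List String :=
    keys.foldl (fun acc pid =>
      if !(PySem.Str.strIsdigit (PySem.List.pyGetD (d.getD pid []) 0 "")) then acc ++ [pid]
      else acc) []
  (bad_data_keys.foldl (fun d bad_key => d.erase bad_key) d).items

-- ===== PORT B =====
-- the while loop pops from the end of the stack, so it traverses the reversed item list,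
-- appending kept entries to rev_good; clear() + update(reversed(rev_good)) = rebuilding the
-- dict from rev_good.reverse
def clean_bc_property_value_dict_alt (property_dict : List (String × List String)) : List (String × List String) :=
  let rev_good := property_dict.reverse.foldl
    (fun (acc : List (String × List String)) p =>
      if PySem.Str.strIsdigit (PySem.List.pyGetD p.2 0 "") then acc ++ [(p.1, p.2)] else acc) []
  (rev_good.reverse.foldl (fun (d : PySem.Dict String (List String)) p => d.insert p.1 p.2)
    PySem.Dict.empty).items

-- ===== PRECONDITION & SPEC =====
-- Pre_ excludes (a) entries with an empty value list, on which Python A raises IndexError at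
-- v[LAND_VALUE_INDEX], and (b) duplicate keys, which cannot occur in the Python dict argument.
def Pre_clean_bc_property_value_dict (property_dict : List (String × List String)) : Prop :=
  (property_dict.map Prod.fst).Nodup ∧ ∀ p ∈ property_dict, p.2 ≠ []
instance (property_dict : List (String × List String)) : Decidable (Pre_clean_bc_property_value_dict property_dict) := by unfold Pre_clean_bc_property_value_dict; infer_instance

def pvWitness_clean_bc_property_value_dict : (List (String × List String)) :=
  [("1", ["123", "9"]), ("2", ["x", "1"]), ("3", ["007"])]

def Spec_clean_bc_property_value_dict (property_dict : List (String × List String)) (out : List (String × List String)) : Prop := out = clean_bc_property_value_dict_alt property_dict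
instance (property_dict : List (String × List String)) (out : List (String × List String)) : Decidable (Spec_clean_bc_property_value_dict property_dict out) := by unfold Spec_clean_bc_property_value_dict; infer_instance

-- ===== CLAIM (what is proved, stated in full; the proofs are below) =====
def Claim_equal_clean_bc_property_value_dict : Prop := ∀ (property_dict : List (String × List String)), Dom_clean_bc_property_value_dict property_dict → Pre_clean_bc_property_value_dict property_dict → Spec_clean_bc_property_value_dict property_dict (clean_bc_property_value_dict property_dict)

-- ===== LEMMAS AND PROOFS =====

-- folding `erase` over a key list filters the items by non-membership of the key
theorem pv_items_foldl_erase {κ ν : Type} [BEq κ] (ks : List κ) (d : PySem.Dict κ ν) :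
    (ks.foldl (fun d k => d.erase k) d).items
      = d.items.filter (fun p => !(ks.any (fun k => p.1 == k))) := by
  induction ks generalizing d with
  | nil => simp
  | cons k ks ih =>
    rw [List.foldl_cons, ih]
    simp only [PySem.Dict.erase, List.filter_filter, List.any_cons]
    apply List.filter_congr
    intro p _
    cases h : p.1 == k <;> simp

-- the filter both ports compute: keep the entries whose land value is numeric
def pvKeep (p : String × List String) : Bool :=
  PySem.Str.strIsdigit (PySem.List.pyGetD p.2 0 "")

theorem pv_portA_eq_filter (pd : List (String × List String))
    (hnd : (pd.map Prod.fst).Nodup) :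
    clean_bc_property_value_dict pd = pd.filter pvKeep := by
  unfold clean_bc_property_value_dict
  dsimp only
  have hbad := PySem.List.foldl_append_if
      (fun pid => !(PySem.Str.strIsdigit
        (PySem.List.pyGetD ((PySem.Dict.mk pd).getD pid []) 0 ""))) id
      (PySem.Dict.mk pd).keys []
  simp only [id_eq, List.map_id, List.nil_append] at hbad
  rw [hbad, pv_items_foldl_erase]
  apply List.filter_congr
  intro p hp
  have hitems : (PySem.Dict.mk pd).items = pd := rfl
  have hkeys : (PySem.Dict.mk pd).keys = pd.map Prod.fst := rfl
  have hget : (PySem.Dict.mk pd).getD p.1 [] = p.2 := by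
    refine PySem.Dict.getD_of_mem_items _ ?_ ?_ []
    · rw [hitems]; exact hp
    · rw [hkeys]; exact hnd
  rw [hkeys]
  cases hk : pvKeep p with
  | true =>
    have hqp : (!PySem.Str.strIsdigit (PySem.List.pyGetD ((PySem.Dict.mk pd).getD p.1 []) 0 "")) = false := by
      rw [hget]; unfold pvKeep at hk; rw [hk]; rfl
    simp only [Bool.not_eq_true']
    rw [List.any_eq_false]
    intro a ha
    rw [List.mem_filter] at ha
    simp only [beq_iff_eq]
    rintro rfl
    rw [hqp] at ha
    exact absurd ha.2 (by simp)
  | false =>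
    have hqp : (!PySem.Str.strIsdigit (PySem.List.pyGetD ((PySem.Dict.mk pd).getD p.1 []) 0 "")) = true := by
      rw [hget]; unfold pvKeep at hk; rw [hk]; rfl
    rw [Bool.not_eq_false', List.any_eq_true]
    exact ⟨p.1, List.mem_filter.mpr ⟨List.mem_map.mpr ⟨p, hitems ▸ hp, rfl⟩, hqp⟩, by simp⟩

theorem pv_portB_eq_filter (pd : List (String × List String))
    (hnd : (pd.map Prod.fst).Nodup) :
    clean_bc_property_value_dict_alt pd = pd.filter pvKeep := by
  unfold clean_bc_property_value_dict_alt
  dsimp only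
  have hrev := PySem.List.foldl_append_if
      (fun p : String × List String => PySem.Str.strIsdigit (PySem.List.pyGetD p.2 0 ""))
      (fun p : String × List String => (p.1, p.2)) pd.reverse []
  simp only [List.nil_append] at hrev
  rw [hrev]
  have hmap : (pd.reverse.filter
      (fun p : String × List String => PySem.Str.strIsdigit (PySem.List.pyGetD p.2 0 ""))).map
      (fun p : String × List String => (p.1, p.2)) = (pd.filter pvKeep).reverse := by
    have hid : (fun p : String × List String => (p.1, p.2)) = id := funext fun p => rfl
    rw [hid, List.map_id, List.filter_reverse]
    rfl
  rw [hmap, List.reverse_reverse,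
      PySem.Dict.items_foldl_insert_fresh (pd.filter pvKeep) Prod.fst Prod.snd
        PySem.Dict.empty (by intro a _; simp [PySem.Dict.contains_empty])
        (hnd.sublist (List.Sublist.map Prod.fst List.filter_sublist))]
  simp [PySem.Dict.empty]

-- ===== VERDICT (by name: the statement is the Claim_ definition above) =====
theorem clean_bc_property_value_dict_spec : Claim_equal_clean_bc_property_value_dict := by
  intro pd _ hpre
  unfold Spec_clean_bc_property_value_dict
  rw [pv_portA_eq_filter pd hpre.1, pv_portB_eq_filter pd hpre.1]
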